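-- pv_equiv track=rewrite | github.com/NIC-SBI/CC_protein_origami | ppmod/segment_assignment.py | get_complete_pairs_dict_from_topology
-- ===== SOURCE A (Python) =====
-- import collections
--
-- def get_complete_pairs_dict_from_topology(topology):
--     """Returns the dictionary A-> (A,a), B->(B, B) ... from the topology string or list"""
--     pair_keys = collections.OrderedDict()
--
--     for p in topology:
--         P=p.upper()
--         l = pair_keys.get(P, [])
--         l.append(p)
--         pair_keys[P] = l
--
--     return pair_keys
-- ===== SOURCE B (Python) =====
-- import collections
--
-- def get_complete_pairs_dict_from_topology(topology):
--     """Returns the dictionary A-> (A,a), B->(B, B) ... from the topology string or list"""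
--     pairs = collections.OrderedDict()
--     rest = list(topology)
--     while rest:
--         K = rest[0].upper()
--         pairs[K] = [q for q in rest if q.upper() == K]
--         rest = [q for q in rest if q.upper() != K]
--     return pairs
-- ===== Notes on version B (the rewrite author's own statement) =====
-- stated objective: alternative
-- what changed: Instead of A's single loop that get-defaults, appends and reinserts into an OrderedDict, B repeatedly partitions a shrinking worklist: take the first remaining element's uppercase key, emit the whole group by one filter pass, and drop that group from the worklist; no dict lookup or mutation of existing entries ever happens.
import Mathlib
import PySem

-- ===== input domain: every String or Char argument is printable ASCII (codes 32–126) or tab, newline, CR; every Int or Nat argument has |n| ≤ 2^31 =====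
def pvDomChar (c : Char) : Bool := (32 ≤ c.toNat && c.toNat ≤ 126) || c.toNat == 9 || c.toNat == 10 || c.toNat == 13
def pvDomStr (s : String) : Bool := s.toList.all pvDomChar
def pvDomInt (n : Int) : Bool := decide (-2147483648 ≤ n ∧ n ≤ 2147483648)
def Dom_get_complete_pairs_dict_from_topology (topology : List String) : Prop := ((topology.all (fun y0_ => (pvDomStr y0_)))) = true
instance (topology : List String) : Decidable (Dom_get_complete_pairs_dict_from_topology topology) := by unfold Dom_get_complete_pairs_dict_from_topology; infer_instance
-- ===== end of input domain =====

-- B groups by repeatedly partitioning a worklist on the first element's uppercase key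
-- (one filter pass per distinct key, no dict lookups); objective: alternative algorithm.


-- ===== PORT A =====
def get_complete_pairs_dict_from_topology (topology : List String) : List (String × List String) :=
  (topology.foldl
    (fun d p =>
      d.insert (PySem.Str.upper p) (d.getD (PySem.Str.upper p) [] ++ [p]))
    PySem.Dict.empty).items

-- ===== PORT B =====
-- B's while loop: pop the first remaining element's uppercase key, emit its group
-- (one filter), and keep only the elements with a different uppercase as the new worklist.
def pvAltGo (rest : List String) : List (String × List String) :=
  match rest with
  | [] => []
  | p :: t =>
      (PySem.Str.upper p,
        (p :: t).filter (fun q => PySem.Str.upper q == PySem.Str.upper p)) ::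
      pvAltGo ((p :: t).filter (fun q => !(PySem.Str.upper q == PySem.Str.upper p)))
termination_by rest.length
decreasing_by
  simp only [List.filter_cons, beq_self_eq_true, Bool.not_true, Bool.false_eq_true,
    if_false, List.length_cons]
  have := List.length_filter_le (fun q => !(PySem.Str.upper q == PySem.Str.upper p)) t
  omega

def get_complete_pairs_dict_from_topology_alt (topology : List String) : List (String × List String) :=
  pvAltGo topology

-- ===== PRECONDITION & SPEC =====
def Spec_get_complete_pairs_dict_from_topology (topology : List String) (out : List (String × List String)) : Prop := out = get_complete_pairs_dict_from_topology_alt topology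
instance (topology : List String) (out : List (String × List String)) : Decidable (Spec_get_complete_pairs_dict_from_topology topology out) := by unfold Spec_get_complete_pairs_dict_from_topology; infer_instance

-- ===== CLAIM (what is proved, stated in full; the proofs are below) =====
def Claim_equal_get_complete_pairs_dict_from_topology : Prop := ∀ (topology : List String), Dom_get_complete_pairs_dict_from_topology topology → Spec_get_complete_pairs_dict_from_topology topology (get_complete_pairs_dict_from_topology topology)

-- ===== LEMMAS AND PROOFS =====

-- A's append-grouping loop: its value at key c is the filter of the processed list.
theorem pv_getD_foldA (l : List String) (d : PySem.Dict String (List String)) (c : String) :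
    (l.foldl (fun d p => d.insert (PySem.Str.upper p) (d.getD (PySem.Str.upper p) [] ++ [p])) d).getD c []
      = d.getD c [] ++ l.filter (fun p => PySem.Str.upper p == c) := by
  induction l generalizing d with
  | nil => simp
  | cons x xs ih =>
      simp only [List.foldl_cons, List.filter_cons, ih, PySem.Dict.getD_insert]
      by_cases h : c = PySem.Str.upper x
      · simp [h, List.append_assoc]
      · have : (PySem.Str.upper x == c) = false := by
          simp only [beq_eq_false_iff_ne, ne_eq]; exact fun hh => h hh.symm
        simp [h, this]

-- Adding elements already in the set is a no-op for foldl Set.add.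
theorem pv_foldl_add_filter {α : Type} [DecidableEq α] (xs : List α) (s : PySem.Set α)
    (x : α) (hx : x ∈ s) :
    xs.foldl PySem.Set.add s = (xs.filter (fun y => !(y == x))).foldl PySem.Set.add s := by
  induction xs generalizing s with
  | nil => rfl
  | cons y ys ih =>
      simp only [List.filter_cons]
      by_cases h : y = x
      · subst h
        simp only [beq_self_eq_true, Bool.not_true, Bool.false_eq_true, if_false]
        have : PySem.Set.add s y = s := by
          simp [PySem.Set.add, PySem.Set.contains, hx]
        rw [List.foldl_cons, this, ih s hx]
      · rw [if_pos (by simp [h]), List.foldl_cons, List.foldl_cons]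
        exact ih _ (by simp [PySem.Set.add, PySem.Set.contains]; split <;> simp [hx])

-- foldl Set.add distributes a fresh head to the front when it never recurs.
theorem pv_foldl_add_cons {α : Type} [DecidableEq α] (ys : List α) (s : List α) (x : α)
    (hx : x ∉ ys) :
    ys.foldl PySem.Set.add (x :: s) = x :: ys.foldl PySem.Set.add s := by
  induction ys generalizing s with
  | nil => rfl
  | cons y t ih =>
      have hyx : y ≠ x := fun h => hx (by simp [h])
      have : PySem.Set.add (x :: s) y = x :: PySem.Set.add s y := by
        simp [PySem.Set.add, PySem.Set.contains, hyx]
        split <;> simp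
      rw [List.foldl_cons, this, List.foldl_cons, ih _ (fun h => hx (by simp [h]))]
  
-- First-occurrence dedup peels its head: dedup (x :: xs) = x :: dedup (xs minus x).
theorem pv_dedup_cons {α : Type} [DecidableEq α] (x : α) (xs : List α) :
    PySem.List.dedup (x :: xs) = x :: PySem.List.dedup (xs.filter (fun y => !(y == x))) := by
  have h1 : PySem.List.dedup (x :: xs) = xs.foldl PySem.Set.add [x] := by
    simp [PySem.List.dedup, PySem.Set.ofList_eq_foldl, PySem.Set.add, PySem.Set.contains]
  rw [h1, pv_foldl_add_filter xs [x] x (by simp)]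
  rw [pv_foldl_add_cons _ _ _ (by simp)]
  simp [PySem.List.dedup, PySem.Set.ofList_eq_foldl]

-- B's partition recursion computes, per distinct uppercase key in first-seen order,
-- the filter of the whole remaining list.
theorem pv_altGo_eq (l : List String) :
    pvAltGo l = (PySem.List.dedup (l.map PySem.Str.upper)).map
      (fun K => (K, l.filter (fun q => PySem.Str.upper q == K))) := by
  induction hn : l.length using Nat.strong_induction_on generalizing l with
  | _ n ih =>
    match l with
    | [] => rw [pvAltGo]; simp [PySem.List.dedup]
    | p :: t =>
      rw [pvAltGo]
      have hhead : ((p :: t).filter (fun q => !(PySem.Str.upper q == PySem.Str.upper p)))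
          = t.filter (fun q => !(PySem.Str.upper q == PySem.Str.upper p)) := by
        simp
      have hlen : (t.filter (fun q => !(PySem.Str.upper q == PySem.Str.upper p))).length < n := by
        have := List.length_filter_le (fun q => !(PySem.Str.upper q == PySem.Str.upper p)) t
        simp at hn; omega
      rw [hhead, ih _ hlen _ rfl]
      -- align the key lists
      have hmap : (t.filter (fun q => !(PySem.Str.upper q == PySem.Str.upper p))).map PySem.Str.upper
          = (t.map PySem.Str.upper).filter (fun y => !(y == PySem.Str.upper p)) := by
        rw [List.filter_map]; rfl
      rw [hmap]
      have hded := pv_dedup_cons (PySem.Str.upper p) (t.map PySem.Str.upper)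
      simp only [List.map_cons, hded, List.map_cons]
      congr 1
      refine List.map_congr_left (fun K hK => ?_)
      have hKne : K ≠ PySem.Str.upper p := by
        have hmem : K ∈ (t.map PySem.Str.upper).filter (fun y => !(y == PySem.Str.upper p)) :=
          (PySem.List.mem_dedup _ _).mp hK
        have := List.of_mem_filter hmem
        simpa using this
      -- filtering for K inside the ≠-partition is filtering the whole list for K
      have hRHS : (p :: t).filter (fun q => PySem.Str.upper q == K)
          = t.filter (fun q => PySem.Str.upper q == K) := by
        have : (PySem.Str.upper p == K) = false := by
          simp only [beq_eq_false_iff_ne, ne_eq]; exact fun hh => hKne hh.symm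
        simp [this]
      rw [hRHS, List.filter_filter]
      refine congrArg _ ?_
      refine List.filter_congr (fun q _ => ?_)
      by_cases hq : PySem.Str.upper q = K
      · simp [hq, hKne]
      · simp [hq]

theorem get_complete_pairs_dict_from_topology_eq (topology : List String) :
    get_complete_pairs_dict_from_topology topology
      = get_complete_pairs_dict_from_topology_alt topology := by
  unfold get_complete_pairs_dict_from_topology get_complete_pairs_dict_from_topology_alt
  set d := topology.foldl
    (fun d p => d.insert (PySem.Str.upper p) (d.getD (PySem.Str.upper p) [] ++ [p]))
    PySem.Dict.empty with hd
  have hnd : d.keys.Nodup := by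
    rw [hd]
    exact PySem.Dict.nodup_keys_foldl_insert_key topology PySem.Str.upper _ _
      (by simp [PySem.Dict.keys_empty])
  have hkeys : d.keys = PySem.Set.ofList (topology.map PySem.Str.upper) := by
    rw [hd, PySem.Dict.keys_foldl_insert_key, PySem.Dict.keys_empty,
      PySem.Set.update_nil_left]
  rw [PySem.Dict.items_eq_map_keys d hnd [], hkeys, pv_altGo_eq]
  have : PySem.List.dedup (topology.map PySem.Str.upper)
      = PySem.Set.ofList (topology.map PySem.Str.upper) := by
    simp [PySem.List.dedup]
  rw [← this]
  refine List.map_congr_left (fun K _ => ?_)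
  have hA := pv_getD_foldA topology PySem.Dict.empty K
  rw [← hd] at hA
  simp [hA]

-- ===== VERDICT (by name: the statement is the Claim_ definition above) =====
theorem get_complete_pairs_dict_from_topology_spec : Claim_equal_get_complete_pairs_dict_from_topology := by
  intro topology _
  exact get_complete_pairs_dict_from_topology_eq topology
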